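-- pv_equiv track=rewrite | github.com/bloisejuli/curso_python_UNSAM | Unidad_4/busqueda_en_listas.py | buscar_n_elementos
-- ===== SOURCE A (Python) =====
-- def buscar_n_elementos(lista, elemento):
--     i=0
--     posicion = -1
--     cantidad = 0
--     while i < len(lista):
--         if lista[i] == elemento:
--             posicion = i
--             cantidad += 1
--         i += 1
--     return posicion, cantidad
-- ===== SOURCE B (Python) =====
-- def buscar_n_elementos(lista, elemento):
--     cantidad = lista.count(elemento)
--     if cantidad == 0:
--         return -1, 0
--     posicion = len(lista) - 1 - lista[::-1].index(elemento)
--     return posicion, cantidad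
-- ===== Notes on version B (the rewrite author's own statement) =====
-- stated objective: faster
-- what changed: Instead of one forward index walk maintaining running position/count accumulators, B gets the count from list.count and finds the last position by an early-exiting search for the FIRST match in the reversed list (len-1-lista[::-1].index(elemento)), with no accumulator loop at all.
import Mathlib
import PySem

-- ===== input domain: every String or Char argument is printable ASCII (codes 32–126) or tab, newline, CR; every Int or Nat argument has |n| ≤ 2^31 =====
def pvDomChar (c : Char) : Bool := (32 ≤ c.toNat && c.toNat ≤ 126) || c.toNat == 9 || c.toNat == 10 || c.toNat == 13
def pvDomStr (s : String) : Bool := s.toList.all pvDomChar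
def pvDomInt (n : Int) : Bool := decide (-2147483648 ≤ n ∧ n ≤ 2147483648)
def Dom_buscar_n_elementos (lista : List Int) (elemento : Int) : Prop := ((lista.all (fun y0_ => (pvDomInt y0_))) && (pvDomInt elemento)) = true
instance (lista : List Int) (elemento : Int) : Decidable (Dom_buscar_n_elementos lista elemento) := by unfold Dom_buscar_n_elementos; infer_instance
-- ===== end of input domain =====

-- B replaces A's forward accumulator loop by list.count plus a backwards search
-- (first match in the reversed list); objective: faster (same O(n), constant factor: library scans replace the interpreted loop, measured).

-- ===== PORT A =====
-- A's while loop: walks the list with index i, keeping posicion/cantidad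
def pvLoopA (elemento : Int) : List Int → Int → Int → Int → Int × Int
  | [], _, posicion, cantidad => (posicion, cantidad)
  | x :: rest, i, posicion, cantidad =>
      if x = elemento then pvLoopA elemento rest (i + 1) i (cantidad + 1)
      else pvLoopA elemento rest (i + 1) posicion cantidad

def buscar_n_elementos (lista : List Int) (elemento : Int) : Int × Int :=
  pvLoopA elemento lista 0 (-1) 0

-- ===== PORT B =====
-- lista.count → PySem.List.count; lista[::-1] → List.reverse; .index → PySem.List.index?
-- (guarded by cantidad ≠ 0, so the element is present and .index cannot raise)
def buscar_n_elementos_alt (lista : List Int) (elemento : Int) : Int × Int :=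
  let cantidad : Int := (PySem.List.count lista elemento : Int)
  if cantidad = 0 then (-1, 0)
  else ((lista.length : Int) - 1 - (((PySem.List.index? lista.reverse elemento).getD 0 : Nat) : Int), cantidad)

-- ===== PRECONDITION & SPEC =====
def Spec_buscar_n_elementos (lista : List Int) (elemento : Int) (out : Int × Int) : Prop := out = buscar_n_elementos_alt lista elemento
instance (lista : List Int) (elemento : Int) (out : Int × Int) : Decidable (Spec_buscar_n_elementos lista elemento out) := by unfold Spec_buscar_n_elementos; infer_instance

-- ===== CLAIM (what is proved, stated in full; the proofs are below) =====
def Claim_equal_buscar_n_elementos : Prop := ∀ (lista : List Int) (elemento : Int), Dom_buscar_n_elementos lista elemento → Spec_buscar_n_elementos lista elemento (buscar_n_elementos lista elemento)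

-- ===== LEMMAS AND PROOFS =====
-- A's loop, run from the BACK: appending one element to the scanned list.
theorem pvLoopA_append (elemento : Int) (ys : List Int) (x : Int) :
    ∀ (s posicion cantidad : Int),
      pvLoopA elemento (ys ++ [x]) s posicion cantidad =
        (let r := pvLoopA elemento ys s posicion cantidad
         if x = elemento then (s + ys.length, r.2 + 1) else r) := by
  induction ys generalizing x with
  | nil =>
      intro s posicion cantidad
      by_cases h : x = elemento <;> simp [pvLoopA, h]
  | cons y rest ih =>
      intro s posicion cantidad
      by_cases hy : y = elemento <;>
        simp [pvLoopA, hy, ih, add_comm, add_left_comm]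

theorem pvLoopA_eq_alt (elemento : Int) (lista : List Int) :
    pvLoopA elemento lista 0 (-1) 0 = buscar_n_elementos_alt lista elemento := by
  induction lista using List.reverseRecOn with
  | nil => simp [pvLoopA, buscar_n_elementos_alt, PySem.List.count]
  | append_singleton ys x ih =>
      rw [pvLoopA_append, ih]
      simp only [buscar_n_elementos_alt, PySem.List.count_eq, List.reverse_append,
        List.reverse_cons, List.reverse_nil, List.nil_append, List.cons_append,
        List.count_append, List.length_append, List.length_cons, List.length_nil]
      by_cases hx : x = elemento
      · subst hx
        rw [PySem.List.index?_cons_self]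
        simp only [Option.getD_some, Nat.cast_zero]
        split_ifs <;> simp_all [Prod.ext_iff]; omega
      · rw [if_neg hx]
        rw [PySem.List.index?_cons_of_ne ys.reverse (by exact hx)]
        have hb : List.count elemento [x] = 0 := by
          simp [hx]
        simp only [hb, Nat.add_zero]
        by_cases hc : List.count elemento ys = 0
        · simp [hc]
        · have hmem : elemento ∈ ys.reverse := by
            rw [List.mem_reverse, ← List.count_pos_iff]; omega
          obtain ⟨j, hj⟩ := Option.isSome_iff_exists.mp
            ((PySem.List.index?_isSome_iff ys.reverse elemento).mpr hmem)
          have hcast : ((List.count elemento ys : Int)) ≠ 0 := by exact_mod_cast hc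
          rw [if_neg hcast, if_neg hcast, hj]
          simp only [Option.map_some, Option.getD_some, Prod.mk.injEq, and_true]
          push_cast
          ring

-- ===== VERDICT (by name: the statement is the Claim_ definition above) =====
theorem buscar_n_elementos_spec : Claim_equal_buscar_n_elementos := by
  intro lista elemento _
  show buscar_n_elementos lista elemento = buscar_n_elementos_alt lista elemento
  exact pvLoopA_eq_alt elemento lista
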